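-- pv_equiv track=rewrite | github.com/twmcdunn/set_multiplication_factors | main.py | isCompProd
-- ===== SOURCE A (Python) =====
-- def isCompProd(set1, set2):
--     prod = []
--     for i in range(len(set1)):
--         for n in range(len(set2)):
--             sum = (set1[i] + set2[n]) % 12
--             if sum not in prod:
--                 prod.append(sum)
--             else:
--                 return False
--     return True
-- ===== SOURCE B (Python) =====
-- def isCompProd(set1, set2):
--     if len(set1) * len(set2) > 12:
--         return False  # pigeonhole: more than 12 sums mod 12 cannot all be distinct
--     sums = sorted((set1[i] + set2[n]) % 12 for i in range(len(set1)) for n in range(len(set2)))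
--     for prev, cur in zip(sums, sums[1:]):
--         if prev == cur:
--             return False
--     return True
-- ===== Notes on version B (the rewrite author's own statement) =====
-- stated objective: alternative
-- what changed: Replaces the incremental seen-list with linear membership tests and early return by a pigeonhole shortcut (more than 12 pairwise sums mod 12 can never be distinct) plus, for the remaining small products, building all pairwise sums mod 12 at once, sorting them and scanning once for an adjacent duplicate.
import Mathlib
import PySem

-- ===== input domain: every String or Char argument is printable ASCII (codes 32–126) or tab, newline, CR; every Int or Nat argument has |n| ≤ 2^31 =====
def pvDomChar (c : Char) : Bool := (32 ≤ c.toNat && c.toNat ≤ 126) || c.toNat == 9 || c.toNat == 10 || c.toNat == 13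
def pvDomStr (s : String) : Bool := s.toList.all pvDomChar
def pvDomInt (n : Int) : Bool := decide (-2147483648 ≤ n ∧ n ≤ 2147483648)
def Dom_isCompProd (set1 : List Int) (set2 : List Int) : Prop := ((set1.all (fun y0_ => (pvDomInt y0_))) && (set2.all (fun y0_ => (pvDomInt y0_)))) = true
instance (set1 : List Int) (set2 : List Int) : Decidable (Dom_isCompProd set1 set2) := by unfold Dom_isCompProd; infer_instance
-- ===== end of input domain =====

-- B replaces A's incremental seen-list (linear membership test, early return) by a pigeonhole
-- shortcut (more than 12 sums mod 12 always collide) and otherwise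
-- sort-all-pairwise-sums-then-adjacent-duplicate-scan.

-- ===== PORT A =====
-- inner loop 'for n in range(len(set2))' over set2's elements, carrying prod; none = the early 'return False'
def pvInnerA (x : Int) : List Int → List Int → Option (List Int)
  | [], prod => some prod
  | y :: ys, prod =>
    let sum := PySem.Int.mod (x + y) 12
    if sum ∉ prod then pvInnerA x ys (prod ++ [sum]) else none

-- outer loop 'for i in range(len(set1))'
def pvOuterA (set2 : List Int) : List Int → List Int → Bool
  | [], _ => true
  | x :: xs, prod =>
    match pvInnerA x set2 prod with
    | none => false
    | some p => pvOuterA set2 xs p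

def isCompProd (set1 : List Int) (set2 : List Int) : Bool :=
  pvOuterA set2 set1 []

-- ===== PORT B =====
-- 'for prev, cur in zip(sums, sums[1:]): if prev == cur: return False' / 'return True'
def pvAdjScan : List Int → Bool
  | [] => true
  | [_] => true
  | a :: b :: rest => if a == b then false else pvAdjScan (b :: rest)

def isCompProd_alt (set1 : List Int) (set2 : List Int) : Bool :=
  -- pigeonhole shortcut: more than 12 pairwise sums mod 12 cannot all be distinct
  if 12 < set1.length * set2.length then false
  else
    let sums := PySem.List.sorted (set1.flatMap (fun i => set2.map (fun n => PySem.Int.mod (i + n) 12))) (fun x => x) false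
    pvAdjScan sums

-- ===== PRECONDITION & SPEC =====
def Spec_isCompProd (set1 : List Int) (set2 : List Int) (out : Bool) : Prop := out = isCompProd_alt set1 set2
instance (set1 : List Int) (set2 : List Int) (out : Bool) : Decidable (Spec_isCompProd set1 set2 out) := by unfold Spec_isCompProd; infer_instance

-- ===== CLAIM (what is proved, stated in full; the proofs are below) =====
def Claim_equal_isCompProd : Prop := ∀ (set1 : List Int) (set2 : List Int), Dom_isCompProd set1 set2 → Spec_isCompProd set1 set2 (isCompProd set1 set2)

-- ===== LEMMAS AND PROOFS =====

theorem pvInnerA_eq (x : Int) (ys prod : List Int) (h : prod.Nodup) :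
    pvInnerA x ys prod =
      if (prod ++ ys.map (fun y => PySem.Int.mod (x + y) 12)).Nodup
      then some (prod ++ ys.map (fun y => PySem.Int.mod (x + y) 12)) else none := by
  induction ys generalizing prod with
  | nil => simp only [pvInnerA, List.map_nil, List.append_nil, if_pos h]
  | cons y ys ih =>
    simp only [pvInnerA, List.map_cons]
    by_cases hm : PySem.Int.mod (x + y) 12 ∈ prod
    · rw [if_neg (by simpa using hm)]
      have hno : ¬ (prod ++ (PySem.Int.mod (x + y) 12 :: ys.map (fun y => PySem.Int.mod (x + y) 12))).Nodup := by
        intro hc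
        rw [List.nodup_append] at hc
        exact hc.2.2 _ hm _ List.mem_cons_self rfl
      rw [if_neg hno]
    · rw [if_pos hm]
      have hnd : (prod ++ [PySem.Int.mod (x + y) 12]).Nodup := by
        rw [List.nodup_append]
        refine ⟨h, List.nodup_singleton _, ?_⟩
        intro a ha b hb
        rw [List.mem_singleton] at hb
        subst hb
        exact fun he => hm (he ▸ ha)
      rw [ih _ hnd]
      simp only [List.append_assoc, List.singleton_append]

theorem pvOuterA_eq (set2 : List Int) (xs prod : List Int) (h : prod.Nodup) :
    pvOuterA set2 xs prod =
      decide (prod ++ xs.flatMap (fun x => set2.map (fun y => PySem.Int.mod (x + y) 12))).Nodup := by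
  induction xs generalizing prod with
  | nil =>
    simp only [pvOuterA, List.flatMap_nil, List.append_nil]
    exact (decide_eq_true h).symm
  | cons x xs ih =>
    simp only [pvOuterA, List.flatMap_cons]
    rw [pvInnerA_eq x set2 prod h]
    by_cases hnd : (prod ++ set2.map (fun y => PySem.Int.mod (x + y) 12)).Nodup
    · rw [if_pos hnd]
      show pvOuterA set2 xs _ = _
      rw [ih _ hnd, List.append_assoc]
    · rw [if_neg hnd]
      show false = _
      have hno : ¬ (prod ++ (set2.map (fun y => PySem.Int.mod (x + y) 12) ++
          xs.flatMap (fun x => set2.map (fun y => PySem.Int.mod (x + y) 12)))).Nodup := by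
        intro hc
        rw [← List.append_assoc] at hc
        exact hnd (hc.sublist (List.sublist_append_left _ _))
      exact (decide_eq_false hno).symm

theorem pvAdjScan_nodup (l : List Int) (hs : l.Pairwise (· ≤ ·)) :
    pvAdjScan l = decide l.Nodup := by
  induction l with
  | nil => simp [pvAdjScan]
  | cons a l ih =>
    cases l with
    | nil => simp [pvAdjScan]
    | cons b rest =>
      by_cases hab : a = b
      · subst hab
        simp [pvAdjScan]
      · simp only [pvAdjScan, beq_iff_eq, if_neg hab]
        rw [ih hs.of_cons]
        have hamem : a ∉ b :: rest := by
          intro hmem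
          have hab' : a ≤ b := (List.pairwise_cons.mp hs).1 b List.mem_cons_self
          rcases List.mem_cons.mp hmem with h1 | h2
          · exact hab h1
          · have hba : b ≤ a := (List.pairwise_cons.mp hs.of_cons).1 a h2
            exact hab (le_antisymm hab' hba)
        simp [List.nodup_cons, hamem]

theorem pvFlatLen (set2 : List Int) (f : Int → Int → Int) :
    ∀ (l : List Int), (l.flatMap (fun i => set2.map (f i))).length = l.length * set2.length := by
  intro l
  induction l with
  | nil => simp
  | cons x xs ih => simp [ih, Nat.succ_mul, Nat.add_comm]

theorem pvPigeon (L : List Int) (hlen : 12 < L.length) (hmem : ∀ z ∈ L, 0 ≤ z ∧ z < 12) :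
    ¬ L.Nodup := by
  intro hnd
  have hcard : L.toFinset.card = L.length := List.toFinset_card_of_nodup hnd
  have hsub : L.toFinset ⊆ Finset.Ico (0 : Int) 12 := by
    intro z hz
    rw [List.mem_toFinset] at hz
    have := hmem z hz
    rw [Finset.mem_Ico]
    exact this
  have hle : L.toFinset.card ≤ (Finset.Ico (0 : Int) 12).card := Finset.card_le_card hsub
  rw [Int.card_Ico] at hle
  omega

-- ===== VERDICT (by name: the statement is the Claim_ definition above) =====
theorem isCompProd_spec : Claim_equal_isCompProd := by
  intro set1 set2 _
  unfold Spec_isCompProd isCompProd isCompProd_alt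
  by_cases hbig : 12 < set1.length * set2.length
  · rw [if_pos hbig, pvOuterA_eq set2 set1 [] List.nodup_nil, List.nil_append]
    have hlen : 12 < (set1.flatMap (fun x => set2.map (fun y => PySem.Int.mod (x + y) 12))).length := by
      rw [pvFlatLen set2 (fun x y => PySem.Int.mod (x + y) 12) set1]
      exact hbig
    have hmem : ∀ z ∈ set1.flatMap (fun x => set2.map (fun y => PySem.Int.mod (x + y) 12)), 0 ≤ z ∧ z < 12 := by
      intro z hz
      rw [List.mem_flatMap] at hz
      obtain ⟨x, _, hz⟩ := hz
      rw [List.mem_map] at hz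
      obtain ⟨y, _, rfl⟩ := hz
      exact ⟨PySem.Int.mod_nonneg _ (by norm_num), PySem.Int.mod_lt _ (by norm_num)⟩
    exact decide_eq_false (pvPigeon _ hlen hmem)
  · rw [if_neg hbig]
    show pvOuterA set2 set1 [] =
      pvAdjScan (PySem.List.sorted (set1.flatMap (fun i => set2.map (fun n => PySem.Int.mod (i + n) 12))) (fun x => x) false)
    have hperm := PySem.List.sorted_perm (set1.flatMap (fun i => set2.map (fun n => PySem.Int.mod (i + n) 12))) (fun x : Int => x) false
    have hpw : (PySem.List.sorted (set1.flatMap (fun i => set2.map (fun n => PySem.Int.mod (i + n) 12))) (fun x : Int => x) false).Pairwise (· ≤ ·) := by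
      simpa using PySem.List.sorted_pairwise (xs := set1.flatMap (fun i => set2.map (fun n => PySem.Int.mod (i + n) 12))) (key := fun x : Int => x)
    rw [pvOuterA_eq set2 set1 [] List.nodup_nil, List.nil_append, pvAdjScan_nodup _ hpw]
    simp only [decide_eq_decide]
    exact hperm.nodup_iff.symm
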